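-- pv_equiv track=rewrite | github.com/biaphra/Sistema-Multi-Agente-SQL-Injection | agents/evasion_specialist.py | _advanced_character_encoding
-- ===== SOURCE A (Python) =====
-- from typing import Dict, List
--
-- def _advanced_character_encoding(payload: str) -> List[str]:
--     """Encoding avançado de caracteres"""
--     variations = []
--
--     # Mixed encoding
--     mixed_encoded = ""
--     for i, char in enumerate(payload):
--         if i % 3 == 0:
--             mixed_encoded += f'%{ord(char):02x}'
--         elif i % 3 == 1:
--             mixed_encoded += f'\\x{ord(char):02x}'
--         else:
--             mixed_encoded += char
--     variations.append(mixed_encoded)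
--
--     # Decimal encoding
--     decimal_encoded = ''.join([f'&#{ord(c)};' for c in payload])
--     variations.append(decimal_encoded)
--
--     return variations
-- ===== SOURCE B (Python) =====
-- from typing import Dict, List
--
-- def _advanced_character_encoding(payload: str) -> List[str]:
--     """Encoding avançado de caracteres (chunk-of-3 traversal)"""
--     parts = []
--     for j in range(0, len(payload), 3):
--         chunk = payload[j:j + 3]
--         parts.append(f'%{ord(chunk[0]):02x}')
--         if len(chunk) > 1:
--             parts.append(f'\\x{ord(chunk[1]):02x}')
--         if len(chunk) > 2:
--             parts.append(chunk[2])
--     mixed_encoded = ''.join(parts)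
--     decimal_encoded = ''.join(f'&#{ord(c)};' for c in payload)
--     return [mixed_encoded, decimal_encoded]
-- ===== Notes on version B (the rewrite author's own statement) =====
-- stated objective: alternative
-- what changed: Replaces the per-index enumerate loop with i%3 modulo dispatch by a positional traversal in chunks of three (slice per chunk, parts list joined at the end); the modulo arithmetic disappears.
import Mathlib
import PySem

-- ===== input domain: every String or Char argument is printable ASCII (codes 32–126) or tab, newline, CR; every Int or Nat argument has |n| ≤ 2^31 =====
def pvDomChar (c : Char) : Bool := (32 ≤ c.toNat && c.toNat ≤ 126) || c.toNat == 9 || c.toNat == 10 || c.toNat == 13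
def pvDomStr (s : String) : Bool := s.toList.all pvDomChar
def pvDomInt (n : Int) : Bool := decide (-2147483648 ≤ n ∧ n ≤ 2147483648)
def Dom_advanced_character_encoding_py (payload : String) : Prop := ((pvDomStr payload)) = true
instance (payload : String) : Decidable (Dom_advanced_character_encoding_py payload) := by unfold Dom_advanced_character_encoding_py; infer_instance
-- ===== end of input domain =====

-- B iterates the payload in chunks of three instead of an indexed loop with i%3 dispatch (alternative decomposition).
-- ===== PORT A =====
-- f'{n:02x}' for 0 <= n < 256 (all chars in Dom): two lowercase hex digits
def pvHexDigit (n : Nat) : Char := if n < 10 then Char.ofNat (48 + n) else Char.ofNat (87 + n)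
def pvHex02 (n : Nat) : List Char := [pvHexDigit (n / 16), pvHexDigit (n % 16)]

def advanced_character_encoding_py (payload : String) : List String :=
  let mixed : List Char := (PySem.List.enumerate payload.toList).foldl (fun acc p =>
    if PySem.Int.mod p.1 3 = 0 then acc ++ '%' :: pvHex02 p.2.toNat
    else if PySem.Int.mod p.1 3 = 1 then acc ++ '\\' :: 'x' :: pvHex02 p.2.toNat
    else acc ++ [p.2]) []
  let decimal : List Char :=
    PySem.Chars.join [] (payload.toList.map (fun c => '&' :: '#' :: (PySem.Int.toChars (c.toNat : Int) ++ [';'])))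
  [String.ofList mixed, String.ofList decimal]

-- ===== PORT B =====
-- the parts list built by Source B's chunk loop: '%xx' for slot 0, '\\xxx' for slot 1, raw char for slot 2
def pvChunks3 : List Char → List (List Char)
  | [] => []
  | [a] => ['%' :: pvHex02 a.toNat]
  | [a, b] => ['%' :: pvHex02 a.toNat, '\\' :: 'x' :: pvHex02 b.toNat]
  | a :: b :: c :: rest =>
      ('%' :: pvHex02 a.toNat) :: ('\\' :: 'x' :: pvHex02 b.toNat) :: [c] :: pvChunks3 rest

def advanced_character_encoding_py_alt (payload : String) : List String :=
  let mixed : List Char := PySem.Chars.join [] (pvChunks3 payload.toList)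
  let decimal : List Char :=
    PySem.Chars.join [] (payload.toList.map (fun c => '&' :: '#' :: (PySem.Int.toChars (c.toNat : Int) ++ [';'])))
  [String.ofList mixed, String.ofList decimal]

-- ===== PRECONDITION & SPEC =====
def Spec_advanced_character_encoding_py (payload : String) (out : List String) : Prop := out = advanced_character_encoding_py_alt payload
instance (payload : String) (out : List String) : Decidable (Spec_advanced_character_encoding_py payload out) := by unfold Spec_advanced_character_encoding_py; infer_instance

-- ===== CLAIM (what is proved, stated in full; the proofs are below) =====
def Claim_equal_advanced_character_encoding_py : Prop := ∀ (payload : String), Dom_advanced_character_encoding_py payload → Spec_advanced_character_encoding_py payload (advanced_character_encoding_py payload)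

-- ===== LEMMAS AND PROOFS =====

lemma pvJoin_cons (x : List Char) (xs : List (List Char)) :
    PySem.Chars.join [] (x :: xs) = x ++ PySem.Chars.join [] xs := by
  cases xs <;> simp [PySem.Chars.join_cons_cons, PySem.Chars.join_singleton, PySem.Chars.join_nil]

lemma pvMod3_0 (n : Nat) : PySem.Int.mod (3*(n:Int)) 3 = 0 := by
  rw [PySem.Int.mod_eq_emod_of_pos (b := 3) (by omega)]; omega
lemma pvMod3_1 (n : Nat) : PySem.Int.mod (3*(n:Int)+1) 3 = 1 := by
  rw [PySem.Int.mod_eq_emod_of_pos (b := 3) (by omega)]; omega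
lemma pvMod3_2 (n : Nat) : PySem.Int.mod (3*(n:Int)+2) 3 = 2 := by
  rw [PySem.Int.mod_eq_emod_of_pos (b := 3) (by omega)]; omega

-- A's enumerate/i%3 fold, started at any index 3*n, appends exactly the join of B's chunk parts
lemma pvMixed_chunks (cs : List Char) : ∀ (n : Nat) (acc : List Char),
    (PySem.List.enumerate cs (3 * (n:Int))).foldl
      (fun acc p =>
        if PySem.Int.mod p.1 3 = 0 then acc ++ '%' :: pvHex02 p.2.toNat
        else if PySem.Int.mod p.1 3 = 1 then acc ++ '\\' :: 'x' :: pvHex02 p.2.toNat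
        else acc ++ [p.2]) acc
    = acc ++ PySem.Chars.join [] (pvChunks3 cs) := by
  induction cs using pvChunks3.induct with
  | case1 =>
      intro n acc
      simp [PySem.List.enumerate_nil, pvChunks3, PySem.Chars.join_nil]
  | case2 a =>
      intro n acc
      simp [PySem.List.enumerate_cons, PySem.List.enumerate_nil, pvChunks3]
  | case3 a b =>
      intro n acc
      simp [PySem.List.enumerate_cons, PySem.List.enumerate_nil, pvChunks3, pvJoin_cons]
  | case4 a b c rest ih =>
      intro n acc
      have h2 : 3 * (n:Int) + 1 + 1 = 3 * (n:Int) + 2 := by ring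
      have h3 : 3 * (n:Int) + 2 + 1 = 3 * ((n+1 : Nat) : Int) := by push_cast; ring
      simp only [PySem.List.enumerate_cons, List.foldl, h2, h3,
        pvMod3_0, pvMod3_1, pvMod3_2, reduceIte]
      rw [ih (n+1)]
      simp [pvChunks3, pvJoin_cons]

-- ===== VERDICT (by name: the statement is the Claim_ definition above) =====
theorem advanced_character_encoding_py_spec : Claim_equal_advanced_character_encoding_py := by
  intro payload _
  have h := pvMixed_chunks payload.toList 0 []
  simp only [Nat.cast_zero, mul_zero, List.nil_append] at h
  simp only [Spec_advanced_character_encoding_py, advanced_character_encoding_py,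
    advanced_character_encoding_py_alt, h]
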